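-- pv_equiv track=rewrite | github.com/lgubb/voicegarage | garage-voice-agent/src/agent.py | french_number_value
-- ===== SOURCE A (Python) =====
-- FRENCH_NUMBER_WORDS = {
--     "zero": 0,
--     "un": 1,
--     "une": 1,
--     "deux": 2,
--     "trois": 3,
--     "quatre": 4,
--     "cinq": 5,
--     "six": 6,
--     "sept": 7,
--     "huit": 8,
--     "neuf": 9,
--     "dix": 10,
--     "onze": 11,
--     "douze": 12,
--     "treize": 13,
--     "quatorze": 14,
--     "quinze": 15,
--     "seize": 16,
--     "vingt": 20,
--     "vingts": 20,
--     "trente": 30,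
--     "quarante": 40,
--     "cinquante": 50,
--     "soixante": 60,
-- }
--
-- def french_number_value(tokens: list[str]) -> int | None:
--     tokens = [token for token in tokens if token != "et"]
--     if not tokens:
--         return None
--     if len(tokens) == 1:
--         return FRENCH_NUMBER_WORDS.get(tokens[0])
--     if tokens[:2] == ["quatre", "vingt"]:
--         suffix = french_number_value(tokens[2:]) if len(tokens) > 2 else 0
--         return 80 + suffix if suffix is not None and suffix <= 19 else None
--     first = FRENCH_NUMBER_WORDS.get(tokens[0])
--     if first is None:
--         return None
--     if first in {20, 30, 40, 50}:
--         suffix = french_number_value(tokens[1:])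
--         return first + suffix if suffix is not None and 0 < suffix < 10 else None
--     if first == 60:
--         suffix = french_number_value(tokens[1:])
--         return first + suffix if suffix is not None and 0 < suffix < 20 else None
--     return None
-- ===== SOURCE B (Python) =====
-- FRENCH_NUMBER_WORDS = {
--     "zero": 0, "un": 1, "une": 1, "deux": 2, "trois": 3, "quatre": 4,
--     "cinq": 5, "six": 6, "sept": 7, "huit": 8, "neuf": 9, "dix": 10,
--     "onze": 11, "douze": 12, "treize": 13, "quatorze": 14, "quinze": 15,
--     "seize": 16, "vingt": 20, "vingts": 20, "trente": 30, "quarante": 40,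
--     "cinquante": 50, "soixante": 60,
-- }
--
-- def french_number_value(tokens: list[str]) -> int | None:
--     # Non-recursive: any valid suffix after a tens word is a single token.
--     toks = [t for t in tokens if t != "et"]
--     if not toks:
--         return None
--     if len(toks) == 1:
--         return FRENCH_NUMBER_WORDS.get(toks[0])
--     if toks[:2] == ["quatre", "vingt"]:
--         rest = toks[2:]
--         if not rest:
--             return 80
--         if len(rest) == 1:
--             v = FRENCH_NUMBER_WORDS.get(rest[0])
--             if v is not None and v <= 19:
--                 return 80 + v
--         return None
--     if len(toks) == 2:
--         first = FRENCH_NUMBER_WORDS.get(toks[0])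
--         v = FRENCH_NUMBER_WORDS.get(toks[1])
--         if first is not None and v is not None:
--             if first in (20, 30, 40, 50) and 0 < v < 10:
--                 return first + v
--             if first == 60 and 0 < v < 20:
--                 return first + v
--     return None
-- ===== Notes on version B (the rewrite author's own statement) =====
-- stated objective: simpler
-- what changed: B replaces A's recursion with a single non-recursive case analysis: since any valid suffix after 'quatre vingt' or a tens word is necessarily a single word, B just inspects the leading tokens and the length of the remainder and does direct dictionary lookups.
import Mathlib
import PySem

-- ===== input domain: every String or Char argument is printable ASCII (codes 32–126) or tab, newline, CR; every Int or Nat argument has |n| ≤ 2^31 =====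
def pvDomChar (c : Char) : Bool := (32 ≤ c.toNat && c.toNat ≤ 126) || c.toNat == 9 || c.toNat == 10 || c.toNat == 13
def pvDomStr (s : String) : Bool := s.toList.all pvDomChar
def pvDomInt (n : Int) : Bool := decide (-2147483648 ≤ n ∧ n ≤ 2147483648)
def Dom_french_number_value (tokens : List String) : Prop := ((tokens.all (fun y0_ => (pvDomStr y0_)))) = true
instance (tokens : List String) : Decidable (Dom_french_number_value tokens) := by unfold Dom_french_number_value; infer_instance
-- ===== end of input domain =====

-- B replaces A's recursion by a direct non-recursive case analysis (any valid suffix is a single token); objective: simpler.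

def FRENCH_NUMBER_WORDS : PySem.Dict String Int := PySem.Dict.ofList
  [("zero", 0), ("un", 1), ("une", 1), ("deux", 2), ("trois", 3), ("quatre", 4),
   ("cinq", 5), ("six", 6), ("sept", 7), ("huit", 8), ("neuf", 9), ("dix", 10),
   ("onze", 11), ("douze", 12), ("treize", 13), ("quatorze", 14), ("quinze", 15),
   ("seize", 16), ("vingt", 20), ("vingts", 20), ("trente", 30), ("quarante", 40),
   ("cinquante", 50), ("soixante", 60)]

-- ===== PORT A =====
def french_number_value (tokens : List String) : Option Int :=
  let toks := tokens.filter (fun t => t != "et")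
  if h0 : toks = [] then none
  else if toks.length = 1 then FRENCH_NUMBER_WORDS.get? toks.head!
  else if toks.take 2 = ["quatre", "vingt"] then
    let suffix := if h2 : toks.length > 2 then french_number_value (toks.drop 2) else some 0
    match suffix with
    | some s => if s ≤ 19 then some (80 + s) else none
    | none => none
  else
    match FRENCH_NUMBER_WORDS.get? toks.head! with
    | none => none
    | some first =>
      if first = 20 ∨ first = 30 ∨ first = 40 ∨ first = 50 then
        match french_number_value (toks.drop 1) with
        | some s => if 0 < s ∧ s < 10 then some (first + s) else none
        | none => none
      else if first = 60 then
        match french_number_value (toks.drop 1) with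
        | some s => if 0 < s ∧ s < 20 then some (first + s) else none
        | none => none
      else none
termination_by tokens.length
decreasing_by
  all_goals
    have ht : toks = (tokens.attach.filter (fun x => x.1 != "et")).unattach := rfl
    simp only [List.unattach_filter, List.unattach_attach] at ht
    have ht' : toks.length = (tokens.filter (fun t => t != "et")).length := by rw [ht]
    have h1 : 1 ≤ toks.length := List.length_pos_iff.mpr h0
    have hf := List.length_filter_le (fun t => t != "et") tokens
    simp only [List.unattach_filter, List.unattach_attach, List.length_drop] at *
    omega

-- ===== PORT B =====
def french_number_value_alt (tokens : List String) : Option Int :=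
  let toks := tokens.filter (fun t => t != "et")
  if toks = [] then none
  else if toks.length = 1 then FRENCH_NUMBER_WORDS.get? toks.head!
  else if toks.take 2 = ["quatre", "vingt"] then
    let rest := toks.drop 2
    if rest = [] then some 80
    else if rest.length = 1 then
      match FRENCH_NUMBER_WORDS.get? rest.head! with
      | some v => if v ≤ 19 then some (80 + v) else none
      | none => none
    else none
  else if toks.length = 2 then
    match FRENCH_NUMBER_WORDS.get? toks.head!, FRENCH_NUMBER_WORDS.get? toks[1]! with
    | some first, some v =>
      if (first = 20 ∨ first = 30 ∨ first = 40 ∨ first = 50) ∧ 0 < v ∧ v < 10 then some (first + v)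
      else if first = 60 ∧ 0 < v ∧ v < 20 then some (first + v)
      else none
    | _, _ => none
  else none

-- ===== PRECONDITION & SPEC =====
def Spec_french_number_value (tokens : List String) (out : Option Int) : Prop := out = french_number_value_alt tokens
instance (tokens : List String) (out : Option Int) : Decidable (Spec_french_number_value tokens out) := by unfold Spec_french_number_value; infer_instance

-- ===== CLAIM (what is proved, stated in full; the proofs are below) =====
def Claim_equal_french_number_value : Prop := ∀ (tokens : List String), Dom_french_number_value tokens → Spec_french_number_value tokens (french_number_value tokens)

-- ===== LEMMAS AND PROOFS =====

lemma filt_idem (l : List String) :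
    (l.filter (fun t => t != "et")).filter (fun t => t != "et") = l.filter (fun t => t != "et") := by
  simp [List.filter_filter]

lemma filt_drop (l : List String) (h : l.filter (fun t => t != "et") = l) (k : Nat) :
    (l.drop k).filter (fun t => t != "et") = l.drop k := by
  rw [List.filter_eq_self] at h ⊢
  intro a ha
  exact h a (List.mem_of_mem_drop ha)

lemma words_bounds (w : String) (v : Int) (h : FRENCH_NUMBER_WORDS.get? w = some v) :
    0 ≤ v ∧ v ≤ 60 := by
  have hm := PySem.Dict.mem_items_of_get?_eq_some _ h
  have hall : ∀ p ∈ FRENCH_NUMBER_WORDS.items, 0 ≤ p.2 ∧ p.2 ≤ 60 := by decide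
  exact hall _ hm

lemma fnv_nil : french_number_value [] = none := by
  rw [french_number_value]
  simp

lemma fnv_single (x : String) (hx : List.filter (fun t => t != "et") [x] = [x]) :
    french_number_value [x] = FRENCH_NUMBER_WORDS.get? x := by
  rw [french_number_value]
  simp [hx]

lemma fnv_main : ∀ (n : Nat) (toks : List String), toks.length ≤ n →
    toks.filter (fun t => t != "et") = toks →
    (french_number_value toks = french_number_value_alt toks ∧
     (∀ v, 2 ≤ toks.length → french_number_value toks = some v → 21 ≤ v)) := by
  intro n
  induction n with
  | zero =>
    intro toks hlen hf
    have : toks = [] := List.eq_nil_of_length_eq_zero (Nat.le_zero.mp hlen)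
    subst this
    refine ⟨by rw [fnv_nil, french_number_value_alt]; simp, by simp⟩
  | succ n ih =>
    intro toks hlen hf
    match toks with
    | [] => exact ⟨by rw [fnv_nil, french_number_value_alt]; simp, by simp⟩
    | [t] =>
      refine ⟨?_, by simp⟩
      rw [fnv_single t hf, french_number_value_alt]
      simp [hf]
    | t0 :: t1 :: rest =>
      have hf1 : List.filter (fun t => t != "et") (t1 :: rest) = t1 :: rest := by
        simpa using filt_drop _ hf 1
      have hf2 : List.filter (fun t => t != "et") rest = rest := by
        simpa using filt_drop _ hf 2
      by_cases hqv : t0 = "quatre" ∧ t1 = "vingt"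
      · obtain ⟨hq, hv⟩ := hqv
        subst hq; subst hv
        cases rest with
        | nil =>
          have hA : french_number_value ["quatre", "vingt"] = some 80 := by
            rw [french_number_value]; simp [hf]
          have hB : french_number_value_alt ["quatre", "vingt"] = some 80 := by
            rw [french_number_value_alt]; simp [hf]
          refine ⟨by rw [hA, hB], ?_⟩
          intro v _ h; rw [hA] at h; simp at h; omega
        | cons x rs =>
          cases rs with
          | nil =>
            have hA : french_number_value ["quatre", "vingt", x] =
                (match FRENCH_NUMBER_WORDS.get? x with
                 | some s => if s ≤ 19 then some (80 + s) else none
                 | none => none) := by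
              rw [french_number_value]
              simp [hf, fnv_single _ hf2]
            have hB : french_number_value_alt ["quatre", "vingt", x] =
                (match FRENCH_NUMBER_WORDS.get? x with
                 | some s => if s ≤ 19 then some (80 + s) else none
                 | none => none) := by
              rw [french_number_value_alt]
              simp [hf]
            refine ⟨by rw [hA, hB], ?_⟩
            intro v _ h
            rw [hA] at h
            cases hgx : FRENCH_NUMBER_WORDS.get? x with
            | none => rw [hgx] at h; simp at h
            | some s =>
              rw [hgx] at h
              have := words_bounds _ _ hgx
              simp at h
              omega
          | cons y rs2 =>
            have hrec := ih (x :: y :: rs2) (by simp at hlen ⊢; omega) hf2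
            have hA : french_number_value ("quatre" :: "vingt" :: x :: y :: rs2) = none := by
              rw [french_number_value]
              simp only [hf]
              cases hs : french_number_value (x :: y :: rs2) with
              | none => simp [hs]
              | some s =>
                have h21 : 21 ≤ s := hrec.2 s (by simp) hs
                simp [hs]
                omega
            have hB : french_number_value_alt ("quatre" :: "vingt" :: x :: y :: rs2) = none := by
              rw [french_number_value_alt]
              simp [hf]
            refine ⟨by rw [hA, hB], ?_⟩
            intro v _ h; rw [hA] at h; simp at h
      · -- first two tokens are not "quatre","vingt"
        cases rest with
        | nil =>
          cases hg0 : FRENCH_NUMBER_WORDS.get? t0 with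
          | none =>
            have hA : french_number_value [t0, t1] = none := by
              rw [french_number_value]; simp [hf, hqv, hg0]
            have hB : french_number_value_alt [t0, t1] = none := by
              rw [french_number_value_alt]; simp [hf, hqv, hg0]
            refine ⟨by rw [hA, hB], ?_⟩
            intro v _ h; rw [hA] at h; simp at h
          | some first =>
            have hsingle : french_number_value [t1] = FRENCH_NUMBER_WORDS.get? t1 :=
              fnv_single _ hf1
            have hA : french_number_value [t0, t1] =
                (if first = 20 ∨ first = 30 ∨ first = 40 ∨ first = 50 then
                  (match FRENCH_NUMBER_WORDS.get? t1 with
                   | some s => if 0 < s ∧ s < 10 then some (first + s) else none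
                   | none => none)
                 else if first = 60 then
                  (match FRENCH_NUMBER_WORDS.get? t1 with
                   | some s => if 0 < s ∧ s < 20 then some (first + s) else none
                   | none => none)
                 else none) := by
              rw [french_number_value]
              simp [hf, hqv, hg0, hsingle]
            have hB : french_number_value_alt [t0, t1] =
                (match FRENCH_NUMBER_WORDS.get? t1 with
                 | some v =>
                   if (first = 20 ∨ first = 30 ∨ first = 40 ∨ first = 50) ∧ 0 < v ∧ v < 10 then some (first + v)
                   else if first = 60 ∧ 0 < v ∧ v < 20 then some (first + v)
                   else none
                 | none => none) := by
              rw [french_number_value_alt]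
              simp [hf, hqv, hg0]
              try cases FRENCH_NUMBER_WORDS.get? t1 <;> rfl
            constructor
            · rw [hA, hB]
              cases hg1 : FRENCH_NUMBER_WORDS.get? t1 with
              | none => simp
              | some s =>
                by_cases htens : first = 20 ∨ first = 30 ∨ first = 40 ∨ first = 50
                · by_cases hs10 : 0 < s ∧ s < 10 <;> simp [htens, hs10] <;> omega
                · by_cases h60 : first = 60
                  · by_cases hs20 : 0 < s ∧ s < 20 <;> simp [h60, hs20]
                  · simp [htens, h60]
            · intro v _ h
              rw [hA] at h
              cases hg1 : FRENCH_NUMBER_WORDS.get? t1 with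
              | none => rw [hg1] at h; split_ifs at h
              | some s =>
                rw [hg1] at h
                split_ifs at h <;> simp at h <;> omega
        | cons x rs =>
          have hrec := ih (t1 :: x :: rs) (by simp at hlen ⊢; omega) hf1
          have hA : french_number_value (t0 :: t1 :: x :: rs) = none := by
            rw [french_number_value]
            simp only [hf]
            cases hg0 : FRENCH_NUMBER_WORDS.get? t0 with
            | none => simp [hqv, hg0]
            | some first =>
              cases hs : french_number_value (t1 :: x :: rs) with
              | none => simp [hqv, hg0, hs]
              | some s =>
                have h21 : 21 ≤ s := hrec.2 s (by simp) hs
                simp [hqv, hg0, hs]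
                split_ifs <;> first | rfl | (exfalso; omega)
          have hB : french_number_value_alt (t0 :: t1 :: x :: rs) = none := by
            rw [french_number_value_alt]
            simp [hf, hqv]
          refine ⟨by rw [hA, hB], ?_⟩
          intro v _ h; rw [hA] at h; simp at h
lemma fnv_eq_filter (l : List String) :
    french_number_value l = french_number_value (l.filter (fun t => t != "et")) := by
  conv_lhs => rw [french_number_value]
  conv_rhs => rw [french_number_value]
  simp only [filt_idem]

lemma alt_eq_filter (l : List String) :
    french_number_value_alt l = french_number_value_alt (l.filter (fun t => t != "et")) := by
  conv_lhs => rw [french_number_value_alt]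
  conv_rhs => rw [french_number_value_alt]
  simp only [filt_idem]

-- ===== VERDICT =====
theorem french_number_value_spec : Claim_equal_french_number_value := by
  intro tokens _
  unfold Spec_french_number_value
  rw [fnv_eq_filter, alt_eq_filter]
  exact (fnv_main _ _ le_rfl (filt_idem tokens)).1
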